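-- pv_equiv track=rewrite | github.com/vrijenattawar/n5os-ode | N5/scripts/meeting_manifest_generator.py | detect_meeting_type
-- ===== SOURCE A (Python) =====
-- def detect_meeting_type(meeting_dir: str) -> str:
--     """
--     Detect if meeting is external, internal, or partnership based on directory name.
--
--     Rules:
--     - Contains '_internal' or '_[M]' suffix → internal
--     - Contains '_external', '_partnership', '_discovery', '_sales' → external
--     - Contains '_coaching', '_advisory' → external
--     - Default → external (conservative: generate stakeholder intel unless explicitly internal)
--
--     Returns: 'external', 'internal', or 'partnership'
--     """
--     meeting_dir_lower = meeting_dir.lower()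
--
--     # Internal markers
--     if '_internal' in meeting_dir_lower or meeting_dir_lower.endswith('_[m]'):
--         return 'internal'
--
--     # External/Partnership markers
--     external_markers = [
--         '_external', '_partnership', '_discovery', '_sales',
--         '_coaching', '_advisory', '_demo', '_networking'
--     ]
--
--     for marker in external_markers:
--         if marker in meeting_dir_lower:
--             if marker == '_partnership':
--                 return 'partnership'
--             return 'external'
--
--     # Default to external (conservative approach)
--     return 'external'
-- ===== SOURCE B (Python) =====
-- def detect_meeting_type(meeting_dir: str) -> str:
--     lower = meeting_dir.lower()
--     if '_internal' in lower or lower.endswith('_[m]'):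
--         return 'internal'
--     if '_partnership' in lower and '_external' not in lower:
--         return 'partnership'
--     return 'external'
-- ===== Notes on version B (the rewrite author's own statement) =====
-- stated objective: simpler
-- what changed: Removed the marker list and its scan loop: every marker except '_partnership' returns the same as the default 'external', so B decides with two direct substring conditions ('_partnership' present and '_external' absent, after the internal check).
import Mathlib
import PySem

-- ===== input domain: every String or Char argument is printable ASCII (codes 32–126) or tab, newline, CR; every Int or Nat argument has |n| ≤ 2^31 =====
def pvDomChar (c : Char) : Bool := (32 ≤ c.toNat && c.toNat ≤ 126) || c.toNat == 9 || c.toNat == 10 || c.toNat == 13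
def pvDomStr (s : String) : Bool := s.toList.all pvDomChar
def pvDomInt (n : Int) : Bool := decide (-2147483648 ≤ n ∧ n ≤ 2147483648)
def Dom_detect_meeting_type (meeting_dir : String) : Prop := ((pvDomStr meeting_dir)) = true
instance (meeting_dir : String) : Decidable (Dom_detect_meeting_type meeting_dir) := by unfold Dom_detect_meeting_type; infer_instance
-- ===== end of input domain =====

-- B drops A's dead marker-scan loop (every marker except '_partnership' yields the default
-- 'external') and decides with two direct substring conditions; return values are identical.

-- ===== PORT A =====
-- early-returning 'for marker in external_markers' loop of A
def pvMarkerLoop (markers : List String) (lower : String) : String :=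
  match markers with
  | [] => "external"
  | m :: rest =>
    if PySem.Str.isIn m lower then
      (if m == "_partnership" then "partnership" else "external")
    else pvMarkerLoop rest lower

def detect_meeting_type (meeting_dir : String) : String :=
  let meeting_dir_lower := PySem.Str.lower meeting_dir
  if PySem.Str.isIn "_internal" meeting_dir_lower
      || PySem.Str.endswith meeting_dir_lower "_[m]" then
    "internal"
  else
    pvMarkerLoop ["_external", "_partnership", "_discovery", "_sales",
                  "_coaching", "_advisory", "_demo", "_networking"] meeting_dir_lower

-- ===== PORT B =====
def detect_meeting_type_alt (meeting_dir : String) : String :=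
  let lower := PySem.Str.lower meeting_dir
  if PySem.Str.isIn "_internal" lower || PySem.Str.endswith lower "_[m]" then
    "internal"
  else if PySem.Str.isIn "_partnership" lower && !PySem.Str.isIn "_external" lower then
    "partnership"
  else
    "external"

-- ===== PRECONDITION & SPEC =====
def Spec_detect_meeting_type (meeting_dir : String) (out : String) : Prop := out = detect_meeting_type_alt meeting_dir
instance (meeting_dir : String) (out : String) : Decidable (Spec_detect_meeting_type meeting_dir out) := by unfold Spec_detect_meeting_type; infer_instance

-- ===== CLAIM (what is proved, stated in full; the proofs are below) =====
def Claim_equal_detect_meeting_type : Prop := ∀ (meeting_dir : String), Dom_detect_meeting_type meeting_dir → Spec_detect_meeting_type meeting_dir (detect_meeting_type meeting_dir)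

-- ===== LEMMAS AND PROOFS =====

-- ===== VERDICT (by name: the statement is the Claim_ definition above) =====
theorem detect_meeting_type_spec : Claim_equal_detect_meeting_type := by
  intro s _
  unfold Spec_detect_meeting_type detect_meeting_type detect_meeting_type_alt
  simp only [pvMarkerLoop, PySem.Str.isIn_eq, PySem.Str.endswith_eq, PySem.Str.toList_lower]
  split_ifs <;> simp_all
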